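-- pv_equiv track=rewrite | github.com/Jo-Ming/AirlineNoShowPrediction | Tools/spoutHelperFunctions.py | splitDateTime
-- ===== SOURCE A (Python) =====
-- def splitDateTime(dateTimestrand):
--     dateStrand = []
--     timeStrand = []
--     strands = []
--     for dateTime in dateTimestrand:
--         if (dateTime == 'NULL' or dateTime == ''):
--             dateStrand.append('NULL')
--             timeStrand.append('NULL')
--         else:
--             separation = dateTime.split(" ")
--             dateStrand.append(separation[0])
--             timeStrand.append(separation[1])
--     return dateStrand, timeStrand
-- ===== SOURCE B (Python) =====
-- def splitDateTime(dateTimestrand):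
--     # Stage 1: normalize -- missing entries become the literal string 'NULL NULL',
--     # so the split stage needs no special case at all.
--     norm = ['NULL NULL' if dt == 'NULL' or dt == '' else dt for dt in dateTimestrand]
--     # Stage 2: uniform split passes produce each output strand.
--     return [s.split(' ')[0] for s in norm], [s.split(' ')[1] for s in norm]
-- ===== Notes on version B (the rewrite author's own statement) =====
-- stated objective: alternative
-- what changed: B first normalizes missing entries to the sentinel string 'NULL NULL' and then produces each output by a uniform split pass, so the placeholder branch disappears from the splitting stage, instead of A's single loop filling two accumulators with a branch per element.
import Mathlib
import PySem

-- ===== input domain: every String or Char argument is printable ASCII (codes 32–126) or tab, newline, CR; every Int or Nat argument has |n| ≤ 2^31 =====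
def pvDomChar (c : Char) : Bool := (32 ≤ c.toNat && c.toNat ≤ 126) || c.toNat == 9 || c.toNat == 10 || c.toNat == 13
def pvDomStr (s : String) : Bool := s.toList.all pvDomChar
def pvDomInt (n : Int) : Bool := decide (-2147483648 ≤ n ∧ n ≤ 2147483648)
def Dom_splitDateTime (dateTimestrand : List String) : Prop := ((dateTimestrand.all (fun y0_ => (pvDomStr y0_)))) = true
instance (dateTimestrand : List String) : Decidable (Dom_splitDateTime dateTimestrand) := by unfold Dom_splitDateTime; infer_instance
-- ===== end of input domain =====

-- B normalizes missing entries to the sentinel 'NULL NULL' and then uses uniform split passes,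
-- removing the placeholder branch from the splitting stage (objective: alternative decomposition).

-- ===== PORT A =====
-- A's single loop carrying the two accumulator lists (dateStrand, timeStrand).
-- separation[1] is looked up with pyGet?; its none case (no space in the string) is an
-- IndexError in Python and is excluded by Pre_splitDateTime, so .getD "" is never the default there.
def splitDateTime (dateTimestrand : List String) : List String × List String :=
  dateTimestrand.foldl
    (fun (acc : List String × List String) dateTime =>
      if dateTime = "NULL" ∨ dateTime = "" then
        (acc.1 ++ ["NULL"], acc.2 ++ ["NULL"])
      else
        let separation := (PySem.Str.split? dateTime " ").getD []
        (acc.1 ++ [(PySem.List.pyGet? separation 0).getD ""],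
         acc.2 ++ [(PySem.List.pyGet? separation 1).getD ""]))
    ([], [])

-- ===== PORT B =====
-- B: normalization pass, then two uniform split passes (no branch at the split stage).
def splitDateTime_alt (dateTimestrand : List String) : List String × List String :=
  let norm := dateTimestrand.map (fun dt =>
    if dt = "NULL" ∨ dt = "" then "NULL NULL" else dt)
  (norm.map (fun s => (PySem.List.pyGet? ((PySem.Str.split? s " ").getD []) 0).getD ""),
   norm.map (fun s => (PySem.List.pyGet? ((PySem.Str.split? s " ").getD []) 1).getD ""))

-- ===== PRECONDITION & SPEC =====
-- Pre_ excludes exactly the inputs on which Python A raises IndexError: a string that is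
-- neither 'NULL' nor '' and contains no space (separation[1] does not exist).
def Pre_splitDateTime (dateTimestrand : List String) : Prop :=
  ∀ s ∈ dateTimestrand, s = "NULL" ∨ s = "" ∨ PySem.Str.isIn " " s = true
instance (dateTimestrand : List String) : Decidable (Pre_splitDateTime dateTimestrand) := by
  unfold Pre_splitDateTime; infer_instance
def pvWitness_splitDateTime : List String := ["NULL", "", "2020-01-01 12:00"]

def Spec_splitDateTime (dateTimestrand : List String) (out : List String × List String) : Prop :=
  out = splitDateTime_alt dateTimestrand
instance (dateTimestrand : List String) (out : List String × List String) :
    Decidable (Spec_splitDateTime dateTimestrand out) := by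
  unfold Spec_splitDateTime; infer_instance

-- ===== CLAIM (what is proved, stated in full; the proofs are below) =====
def Claim_equal_splitDateTime : Prop :=
  ∀ (dateTimestrand : List String), Dom_splitDateTime dateTimestrand →
    Pre_splitDateTime dateTimestrand →
    Spec_splitDateTime dateTimestrand (splitDateTime dateTimestrand)

-- ===== LEMMAS AND PROOFS =====
-- The per-element date/time pair A computes.
def pvPair (dateTime : String) : String × String :=
  if dateTime = "NULL" ∨ dateTime = "" then ("NULL", "NULL")
  else
    let sep := (PySem.Str.split? dateTime " ").getD []
    ((PySem.List.pyGet? sep 0).getD "", (PySem.List.pyGet? sep 1).getD "")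

theorem splitDateTime_foldl (xs : List String) (d t : List String) :
    xs.foldl
      (fun (acc : List String × List String) dateTime =>
        if dateTime = "NULL" ∨ dateTime = "" then
          (acc.1 ++ ["NULL"], acc.2 ++ ["NULL"])
        else
          let separation := (PySem.Str.split? dateTime " ").getD []
          (acc.1 ++ [(PySem.List.pyGet? separation 0).getD ""],
           acc.2 ++ [(PySem.List.pyGet? separation 1).getD ""]))
      (d, t)
    = (d ++ xs.map (fun x => (pvPair x).1), t ++ xs.map (fun x => (pvPair x).2)) := by
  induction xs generalizing d t with
  | nil => simp
  | cons x xs ih =>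
      simp only [List.foldl_cons, List.map_cons]
      by_cases h : x = "NULL" ∨ x = ""
      · simp [h, ih, pvPair, List.append_assoc]
      · simp [h, ih, pvPair, List.append_assoc]

theorem split_sentinel : (PySem.Str.split? "NULL NULL" " ").getD [] = ["NULL", "NULL"] := by
  decide

-- B's per-element values agree with pvPair's projections.
theorem pvPair_norm_fst (x : String) :
    (PySem.List.pyGet?
        ((PySem.Str.split? (if x = "NULL" ∨ x = "" then "NULL NULL" else x) " ").getD []) 0).getD ""
      = (pvPair x).1 := by
  by_cases h : x = "NULL" ∨ x = ""
  · simp [h, pvPair, split_sentinel]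
  · simp [h, pvPair]

theorem pvPair_norm_snd (x : String) :
    (PySem.List.pyGet?
        ((PySem.Str.split? (if x = "NULL" ∨ x = "" then "NULL NULL" else x) " ").getD []) 1).getD ""
      = (pvPair x).2 := by
  by_cases h : x = "NULL" ∨ x = ""
  · simp [h, pvPair, split_sentinel]
  · simp [h, pvPair]

-- ===== VERDICT (by name: the statement is the Claim_ definition above) =====
theorem splitDateTime_spec : Claim_equal_splitDateTime := by
  intro xs _ _
  unfold Spec_splitDateTime splitDateTime splitDateTime_alt
  rw [splitDateTime_foldl]
  simp only [List.map_map, Function.comp_def, pvPair_norm_fst, pvPair_norm_snd,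
    List.nil_append]
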